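-- pv_equiv track=rewrite | github.com/james5635/GeekForGeek-Data-Structure-and-Algorithm | sorting/easy/sort_even_odd_places/solution.py | verify_sort_even_odd
-- ===== SOURCE A (Python) =====
-- def verify_sort_even_odd(arr):
--     """
--     Verify if array is sorted according to even-odd pattern.
--
--     Args:
--         arr: List of integers
--
--     Returns:
--         bool: True if correctly sorted
--     """
--     n = len(arr)
--
--     # Check even indices are increasing
--     for i in range(0, n - 2, 2):
--         if arr[i] > arr[i + 2]:
--             return False
--
--     # Check odd indices are decreasing
--     for i in range(1, n - 2, 2):
--         if arr[i] < arr[i + 2]: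
--             return False
--
--     return True
-- ===== SOURCE B (Python) =====
-- def verify_sort_even_odd(arr):
--     evens = arr[::2]
--     odds = arr[1::2]
--     return evens == sorted(evens) and odds == sorted(odds, reverse=True)
-- ===== Notes on version B (the rewrite author's own statement) =====
-- stated objective: idiomatic
-- what changed: Replaces the two index-stepping adjacency-scan loops with extracting the even/odd-index subsequences by slicing and comparing each against its sorted (resp. reverse-sorted) copy.
import Mathlib
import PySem

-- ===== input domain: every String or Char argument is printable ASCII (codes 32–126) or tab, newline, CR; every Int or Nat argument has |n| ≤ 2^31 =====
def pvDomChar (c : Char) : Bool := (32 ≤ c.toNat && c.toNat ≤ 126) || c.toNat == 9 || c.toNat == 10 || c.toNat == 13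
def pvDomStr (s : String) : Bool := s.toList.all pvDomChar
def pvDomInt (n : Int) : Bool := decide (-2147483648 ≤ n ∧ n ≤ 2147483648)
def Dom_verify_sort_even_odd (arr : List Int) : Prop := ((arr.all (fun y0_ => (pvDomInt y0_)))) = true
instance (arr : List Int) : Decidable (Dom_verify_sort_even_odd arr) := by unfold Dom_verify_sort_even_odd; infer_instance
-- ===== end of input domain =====

-- ===== PORT A =====
-- B is an idiomatic re-statement: slice out the even/odd-index subsequences and
-- compare each with its sorted (resp. reverse-sorted) copy; A scans adjacent pairs by index.
def verify_sort_even_odd (arr : List Int) : Bool :=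
  let n : Int := arr.length
  -- for i in range(0, n - 2, 2): if arr[i] > arr[i + 2]: return False
  ((PySem.List.pyRange 0 (n - 2) 2).all
    (fun i => !decide (PySem.List.pyGetD arr i 0 > PySem.List.pyGetD arr (i + 2) 0))) &&
  -- for i in range(1, n - 2, 2): if arr[i] < arr[i + 2]: return False
  ((PySem.List.pyRange 1 (n - 2) 2).all
    (fun i => !decide (PySem.List.pyGetD arr i 0 < PySem.List.pyGetD arr (i + 2) 0)))

-- ===== PORT B =====
-- exact hand port of the step-2 slice xs[::2] (start 0, step 2 never raises):
-- every other element, beginning with the first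
def everyOther : List Int → List Int
  | [] => []
  | [x] => [x]
  | x :: _ :: rest => x :: everyOther rest

def verify_sort_even_odd_alt (arr : List Int) : Bool :=
  let evens := everyOther arr            -- arr[::2]
  let odds := everyOther (arr.drop 1)    -- arr[1::2]
  decide (evens = PySem.List.sorted evens (fun x => x)) &&
  decide (odds = PySem.List.sorted odds (fun x => x) true)

-- ===== PRECONDITION & SPEC =====
def Spec_verify_sort_even_odd (arr : List Int) (out : Bool) : Prop := out = verify_sort_even_odd_alt arr
instance (arr : List Int) (out : Bool) : Decidable (Spec_verify_sort_even_odd arr out) := by unfold Spec_verify_sort_even_odd; infer_instance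

-- ===== CLAIM (what is proved, stated in full; the proofs are below) =====
def Claim_equal_verify_sort_even_odd : Prop := ∀ (arr : List Int), Dom_verify_sort_even_odd arr → Spec_verify_sort_even_odd arr (verify_sort_even_odd arr)

-- ===== LEMMAS AND PROOFS =====

theorem length_everyOther (xs : List Int) : (everyOther xs).length = (xs.length + 1) / 2 := by
  fun_induction everyOther xs <;> simp [*]; omega

theorem getElem?_everyOther (xs : List Int) (j : Nat) : (everyOther xs)[j]? = xs[2 * j]? := by
  fun_induction everyOther xs generalizing j
  · simp
  · match j with
    | 0 => simp
    | j+1 => simp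
  · rename_i x y rest ih
    match j with
    | 0 => simp
    | j+1 =>
      show (everyOther rest)[j]? = (x :: y :: rest)[2*(j+1)]?
      rw [ih]
      have : 2*(j+1) = (2*j)+1+1 := by omega
      rw [this]; simp

theorem getElem_everyOther (xs : List Int) (j : Nat) (h : 2*j < xs.length) :
    (everyOther xs)[j]'(by rw [length_everyOther]; omega) = xs[2*j]'h := by
  have := getElem?_everyOther xs j
  rwa [List.getElem?_eq_getElem (by rw [length_everyOther]; omega),
       List.getElem?_eq_getElem h, Option.some_inj] at this

theorem evens_loop_iff (arr : List Int) :
    ((PySem.List.pyRange 0 ((arr.length : Int) - 2) 2).all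
      (fun i => !decide (PySem.List.pyGetD arr i 0 > PySem.List.pyGetD arr (i + 2) 0)) = true)
    ↔ (everyOther arr).Pairwise (· ≤ ·) := by
  rw [List.all_eq_true, ← List.isChain_iff_pairwise, List.isChain_iff_getElem]
  constructor
  · intro h j hj
    rw [length_everyOther] at hj
    have hb : 2*j + 2 < arr.length := by omega
    have hmem : ((2*j : Nat) : Int) ∈ PySem.List.pyRange 0 ((arr.length : Int) - 2) 2 := by
      rw [PySem.List.mem_pyRange_iff_of_pos (by norm_num)]
      exact ⟨by positivity, by push_cast; omega, ⟨(j : Int), by push_cast; ring⟩⟩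
    have hle := h _ hmem
    simp only [Bool.not_eq_true', decide_eq_false_iff_not, not_lt] at hle
    rw [PySem.List.pyGetD_eq_getElem arr 0 (by positivity) (by push_cast; omega),
        PySem.List.pyGetD_eq_getElem arr 0 (by positivity) (by push_cast; omega)] at hle
    simp only [show (((2*j : Nat) : Int)).toNat = 2*j from by omega,
               show (((2*j : Nat) : Int) + 2).toNat = 2*j + 2 from by omega] at hle
    rw [getElem_everyOther arr j (by omega), getElem_everyOther arr (j+1) (by omega)]
    simpa [show 2*(j+1) = 2*j+2 from by omega] using hle
  · intro h i hi
    rw [PySem.List.mem_pyRange_iff_of_pos (by norm_num)] at hi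
    obtain ⟨h0, hlt, k, hk⟩ := hi
    simp only [Bool.not_eq_true', decide_eq_false_iff_not, not_lt]
    have hik : i = 2 * (k.toNat : Int) := by omega
    have hb : 2 * k.toNat + 2 < arr.length := by omega
    have hch := h k.toNat (by rw [length_everyOther]; omega)
    rw [getElem_everyOther arr k.toNat (by omega), getElem_everyOther arr (k.toNat+1) (by omega)] at hch
    rw [PySem.List.pyGetD_eq_getElem arr 0 (by omega) (by omega),
        PySem.List.pyGetD_eq_getElem arr 0 (by omega) (by omega)]
    simp only [show i.toNat = 2*k.toNat from by omega, show (i+2).toNat = 2*k.toNat + 2 from by omega]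
    simpa [show 2*(k.toNat+1) = 2*k.toNat+2 from by omega] using hch

theorem odds_loop_iff (arr : List Int) :
    ((PySem.List.pyRange 1 ((arr.length : Int) - 2) 2).all
      (fun i => !decide (PySem.List.pyGetD arr i 0 < PySem.List.pyGetD arr (i + 2) 0)) = true)
    ↔ (everyOther (arr.drop 1)).Pairwise (fun a b => b ≤ a) := by
  rw [List.all_eq_true,
      ← @List.isChain_iff_pairwise Int (fun a b => b ≤ a) (everyOther (arr.drop 1)) ⟨fun h1 h2 => le_trans h2 h1⟩, List.isChain_iff_getElem]
  have hget : ∀ (j : Nat) (h : 2*j + 1 < arr.length),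
      (everyOther (arr.drop 1))[j]'(by rw [length_everyOther]; simp; omega) = arr[2*j+1]'h := by
    intro j h
    rw [getElem_everyOther (arr.drop 1) j (by simp; omega)]
    simp
  constructor
  · intro h j hj
    rw [length_everyOther, List.length_drop] at hj
    have hb : 2*j + 3 < arr.length := by omega
    have hmem : ((2*j + 1 : Nat) : Int) ∈ PySem.List.pyRange 1 ((arr.length : Int) - 2) 2 := by
      rw [PySem.List.mem_pyRange_iff_of_pos (by norm_num)]
      exact ⟨by push_cast; omega, by push_cast; omega, ⟨(j : Int), by push_cast; ring⟩⟩
    have hle := h _ hmem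
    simp only [Bool.not_eq_true', decide_eq_false_iff_not, not_lt] at hle
    rw [PySem.List.pyGetD_eq_getElem arr 0 (by positivity) (by push_cast; omega),
        PySem.List.pyGetD_eq_getElem arr 0 (by positivity) (by push_cast; omega)] at hle
    simp only [show (((2*j+1 : Nat) : Int)).toNat = 2*j+1 from by omega,
               show (((2*j+1 : Nat) : Int) + 2).toNat = 2*j + 3 from by omega] at hle
    rw [hget j (by omega), hget (j+1) (by omega)]
    simpa [show 2*(j+1)+1 = 2*j+3 from by omega] using hle
  · intro h i hi
    rw [PySem.List.mem_pyRange_iff_of_pos (by norm_num)] at hi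
    obtain ⟨h0, hlt, k, hk⟩ := hi
    simp only [Bool.not_eq_true', decide_eq_false_iff_not, not_lt]
    have hik : i = 2 * (k.toNat : Int) + 1 := by omega
    have hb : 2 * k.toNat + 3 < arr.length := by omega
    have hch := h k.toNat (by rw [length_everyOther, List.length_drop]; omega)
    rw [hget k.toNat (by omega), hget (k.toNat+1) (by omega)] at hch
    rw [PySem.List.pyGetD_eq_getElem arr 0 (by omega) (by omega),
        PySem.List.pyGetD_eq_getElem arr 0 (by omega) (by omega)]
    simp only [show i.toNat = 2*k.toNat+1 from by omega, show (i+2).toNat = 2*k.toNat + 3 from by omega]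
    simpa [show 2*(k.toNat+1)+1 = 2*k.toNat+3 from by omega] using hch

theorem eq_sorted_iff (l : List Int) :
    (l = PySem.List.sorted l (fun x => x)) ↔ l.Pairwise (· ≤ ·) := by
  constructor
  · intro h; rw [h]; exact PySem.List.sorted_pairwise l (fun x => x)
  · intro h; exact (PySem.List.sorted_eq_self_of_pairwise l _ h).symm

theorem eq_sorted_rev_iff (l : List Int) :
    (l = PySem.List.sorted l (fun x => x) true) ↔ l.Pairwise (fun a b => b ≤ a) := by
  constructor
  · intro h; rw [h]; exact PySem.List.sorted_pairwise_rev l (fun x => x)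
  · intro h; exact (PySem.List.sorted_rev_eq_self_of_pairwise l _ h).symm

-- ===== VERDICT (by name: the statement is the Claim_ definition above) =====
theorem verify_sort_even_odd_spec : Claim_equal_verify_sort_even_odd := by
  intro arr _
  unfold Spec_verify_sort_even_odd verify_sort_even_odd verify_sort_even_odd_alt
  have h1 : ((PySem.List.pyRange 0 ((arr.length : Int) - 2) 2).all
      (fun i => !decide (PySem.List.pyGetD arr i 0 > PySem.List.pyGetD arr (i + 2) 0)))
      = decide (everyOther arr = PySem.List.sorted (everyOther arr) (fun x => x)) := by
    rw [Bool.eq_iff_iff, decide_eq_true_iff, eq_sorted_iff]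
    exact evens_loop_iff arr
  have h2 : ((PySem.List.pyRange 1 ((arr.length : Int) - 2) 2).all
      (fun i => !decide (PySem.List.pyGetD arr i 0 < PySem.List.pyGetD arr (i + 2) 0)))
      = decide (everyOther (arr.drop 1) = PySem.List.sorted (everyOther (arr.drop 1)) (fun x => x) true) := by
    rw [Bool.eq_iff_iff, decide_eq_true_iff, eq_sorted_rev_iff]
    exact odds_loop_iff arr
  simp only []
  rw [h1, h2]
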